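-- pv_equiv track=rewrite | github.com/jane15s/hillel_python_pro_set_task | hw10_collatz_conjecture/hw10.py | collatz_check
-- ===== SOURCE A (Python) =====
-- def collatz_check(num):
--     seen = set()
--     while num != 1:
--         if num in seen:
--             return False
--         seen.add(num)
--
--         if num % 2 == 0:
--             num //= 2
--         else:
--             num = num * 3 + 1
--     return True
-- ===== SOURCE B (Python) =====
-- def collatz_check(num):
--     # Floyd's tortoise-and-hare cycle detection: O(1) space instead of a growing seen-set.
--     if num == 1:
--         return True
--     step = lambda n: n // 2 if n % 2 == 0 else n * 3 + 1
--     slow = fast = num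
--     while True:
--         slow = step(slow)
--         if slow == 1:
--             return True
--         fast = step(fast)
--         if fast == 1:
--             return True
--         fast = step(fast)
--         if fast == 1:
--             return True
--         if slow == fast:
--             return False
-- ===== Notes on version B (the rewrite author's own statement) =====
-- stated objective: alternative
-- what changed: Replaces the growing seen-set with Floyd's two-pointer (tortoise/hare) cycle detection over the Collatz step, checking ==1 after every single step, so B uses O(1) space instead of an O(steps) set.
import Mathlib
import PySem

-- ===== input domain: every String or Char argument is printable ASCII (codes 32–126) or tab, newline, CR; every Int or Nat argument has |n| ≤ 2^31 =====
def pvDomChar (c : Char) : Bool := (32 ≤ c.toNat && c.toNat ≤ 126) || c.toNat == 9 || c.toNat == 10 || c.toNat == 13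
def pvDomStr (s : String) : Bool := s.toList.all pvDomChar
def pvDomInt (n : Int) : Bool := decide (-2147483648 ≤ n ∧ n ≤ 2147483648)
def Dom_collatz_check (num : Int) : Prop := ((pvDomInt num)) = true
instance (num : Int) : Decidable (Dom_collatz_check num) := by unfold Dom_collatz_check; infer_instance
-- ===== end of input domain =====

-- B replaces A's growing seen-set with Floyd's two-pointer cycle detection (O(1) space); return value only.
-- Both while-loops are made total by a fuel counter (a totality guard only: 200001 single
-- steps / 100000 double iterations, far beyond any stopping time reached on Dom inputs;
-- the equivalence theorem holds for every Int regardless).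

-- ===== PORT A =====
def loopA (seen : PySem.Set Int) (num : Int) : Nat → Bool
  | 0 => false
  | fuel+1 =>
    if num = 1 then true
    else if PySem.Set.contains seen num then false
    else
      loopA (PySem.Set.add seen num)
        (if PySem.Int.mod num 2 = 0 then PySem.Int.floordiv num 2 else num * 3 + 1) fuel

def collatz_check (num : Int) : Bool :=
  loopA PySem.Set.empty num 200001

-- ===== PORT B =====
def fStep (n : Int) : Int :=
  if PySem.Int.mod n 2 = 0 then PySem.Int.floordiv n 2 else n * 3 + 1

def loopB (slow fast : Int) : Nat → Bool
  | 0 => false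
  | fuel+1 =>
    let slow := fStep slow
    if slow = 1 then true
    else
      let fast := fStep fast
      if fast = 1 then true
      else
        let fast := fStep fast
        if fast = 1 then true
        else if slow = fast then false
        else loopB slow fast fuel

def collatz_check_alt (num : Int) : Bool :=
  if num = 1 then true else loopB num num 100000

-- ===== PRECONDITION & SPEC =====
def Spec_collatz_check (num : Int) (out : Bool) : Prop := out = collatz_check_alt num
instance (num : Int) (out : Bool) : Decidable (Spec_collatz_check num out) := by unfold Spec_collatz_check; infer_instance

-- ===== CLAIM (what is proved, stated in full; the proofs are below) =====
def Claim_equal_collatz_check : Prop := ∀ (num : Int), Dom_collatz_check num → Spec_collatz_check num (collatz_check num)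

-- ===== LEMMAS AND PROOFS =====

-- the orbit of the Collatz step
def orb (num : Int) (t : Nat) : Int := fStep^[t] num

theorem orb_zero (num : Int) : orb num 0 = num := rfl

theorem orb_succ (num : Int) (t : Nat) : orb num (t + 1) = fStep (orb num t) := by
  simp [orb, Function.iterate_succ_apply']

-- periodicity: a repeat at i < j propagates forever
theorem orb_periodic (num : Int) (i p : Nat) (hp : orb num (i + p) = orb num i) :
    ∀ d, orb num (i + d + p) = orb num (i + d) := by
  intro d
  induction d with
  | zero => simpa using hp
  | succ d ih =>
      have h1 : i + (d + 1) + p = (i + d + p) + 1 := by omega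
      have h2 : i + (d + 1) = (i + d) + 1 := by omega
      rw [h1, h2, orb_succ, orb_succ, ih]

theorem orb_mod (num : Int) (i p : Nat) (hp0 : 0 < p) (hp : orb num (i + p) = orb num i) :
    ∀ r, orb num (i + r) = orb num (i + r % p) := by
  intro r
  induction r using Nat.strong_induction_on with
  | _ r ih =>
    by_cases h : r < p
    · rw [Nat.mod_eq_of_lt h]
    · have hr : r = (r - p) + p := by omega
      have := orb_periodic num i p hp (r - p)
      have h2 : i + r = i + (r - p) + p := by omega
      rw [h2, this, ih (r - p) (by omega)]
      have : r % p = (r - p) % p := by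
        conv_lhs => rw [hr]
        simp [Nat.add_mod_right]
      rw [this]

-- if k is the FIRST index with orb = 1, the orbit is injective on [0, k]
theorem orb_inj (num : Int) (k : Nat) (hk : orb num k = 1)
    (hmin : ∀ s, s < k → orb num s ≠ 1) :
    ∀ i j, i < j → j ≤ k → orb num i ≠ orb num j := by
  intro i j hij hjk heq
  set p := j - i with hp
  have hp0 : 0 < p := by omega
  have hper : orb num (i + p) = orb num i := by
    have : i + p = j := by omega
    rw [this, heq]
  have hk' : k = i + (k - i) := by omega
  have h1 : orb num (i + (k - i) % p) = 1 := by
    rw [← orb_mod num i p hp0 hper (k - i), ← hk', hk]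
  have hlt : i + (k - i) % p < k := by
    have := Nat.mod_lt (k - i) hp0
    omega
  exact hmin _ hlt h1

-- ===== A returns true when the orbit reaches 1 =====
theorem loopA_true (num : Int) (k : Nat) (hk : orb num k = 1)
    (hmin : ∀ s, s < k → orb num s ≠ 1) :
    ∀ fuel t seen, t ≤ k → k < t + fuel →
      (∀ x, x ∈ seen ↔ ∃ s, s < t ∧ orb num s = x) →
      loopA seen (orb num t) fuel = true := by
  intro fuel
  induction fuel with
  | zero => intro t seen ht hfu _; omega
  | succ fuel ih =>
    intro t seen ht hfu hseen
    by_cases hteq : t = k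
    · subst hteq
      simp [loopA, hk]
    · have htk : t < k := by omega
      have hne1 : orb num t ≠ 1 := hmin t htk
      have hmem : ¬ PySem.Set.contains seen (orb num t) = true := by
        rw [PySem.Set.contains_iff, hseen]
        rintro ⟨s, hs, heq⟩
        exact orb_inj num k hk hmin s t hs (by omega) heq
      have hnext : (if PySem.Int.mod (orb num t) 2 = 0
          then PySem.Int.floordiv (orb num t) 2 else orb num t * 3 + 1) = orb num (t + 1) := by
        rw [orb_succ]; rfl
      rw [loopA, if_neg hne1, if_neg hmem, hnext]
      apply ih (t + 1) _ (by omega) (by omega)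
      intro x
      rw [PySem.Set.mem_add, hseen]
      constructor
      · rintro (⟨s, hs, he⟩ | he)
        · exact ⟨s, by omega, he⟩
        · exact ⟨t, by omega, he.symm⟩
      · rintro ⟨s, hs, he⟩
        by_cases hst : s = t
        · right; rw [← he, hst]
        · left; exact ⟨s, by omega, he⟩

-- ===== B returns true when the orbit reaches 1 =====
theorem loopB_true (num : Int) (k : Nat) (hk : orb num k = 1)
    (hmin : ∀ s, s < k → orb num s ≠ 1) :
    ∀ fuel m, 2 * m < k → k ≤ 2 * m + 2 * fuel →
      loopB (orb num m) (orb num (2 * m)) fuel = true := by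
  intro fuel
  induction fuel with
  | zero => intro m hm hfu; omega
  | succ fuel ih =>
    intro m hm hfu
    have hm1 : m + 1 ≤ k := by omega
    rw [loopB]
    simp only [← orb_succ]
    by_cases h1 : orb num (m + 1) = 1
    · simp [h1]
    · have hm1k : m + 1 < k := by
        rcases Nat.lt_or_ge (m+1) k with h | h
        · exact h
        · exact absurd (by rw [show m+1 = k by omega]; exact hk) h1
      rw [if_neg h1, show 2 * m + 1 + 1 = 2 * m + 2 from by omega]
      by_cases h2 : orb num (2 * m + 1) = 1
      · simp [h2]
      · have h2k : 2 * m + 1 < k := by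
          rcases Nat.lt_or_ge (2*m+1) k with h | h
          · exact h
          · exact absurd (by rw [show 2*m+1 = k by omega]; exact hk) h2
        rw [if_neg h2]
        by_cases h3 : orb num (2 * m + 2) = 1
        · simp [h3]
        · have h3k : 2 * m + 2 < k := by
            rcases Nat.lt_or_ge (2*m+2) k with h | h
            · exact h
            · exact absurd (by rw [show 2*m+2 = k by omega]; exact hk) h3
          rw [if_neg h3]
          have hne : orb num (m + 1) ≠ orb num (2 * m + 2) :=
            orb_inj num k hk hmin (m + 1) (2 * m + 2) (by omega) (by omega)
          rw [if_neg hne]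
          have := ih (m + 1) (by omega) (by omega)
          rw [show 2 * (m + 1) = 2 * m + 2 by omega] at this
          exact this

-- ===== both return false when the orbit never reaches 1 (within the fuel horizon) =====
theorem loopA_false (num : Int) :
    ∀ fuel t seen, (∀ s, s < t + fuel → orb num s ≠ 1) →
      loopA seen (orb num t) fuel = false := by
  intro fuel
  induction fuel with
  | zero => intro t seen _; rw [loopA]
  | succ fuel ih =>
    intro t seen h
    have h1 : orb num t ≠ 1 := h t (by omega)
    rw [loopA, if_neg h1]
    by_cases hmem : PySem.Set.contains seen (orb num t) = true
    · rw [if_pos hmem]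
    · rw [if_neg hmem]
      have hnext : (if PySem.Int.mod (orb num t) 2 = 0
          then PySem.Int.floordiv (orb num t) 2 else orb num t * 3 + 1) = orb num (t + 1) := by
        rw [orb_succ]; rfl
      rw [hnext]
      exact ih (t + 1) _ (fun s hs => h s (by omega))

theorem loopB_false (num : Int) :
    ∀ fuel m, (∀ s, s ≤ 2 * (m + fuel) → orb num s ≠ 1) →
      loopB (orb num m) (orb num (2 * m)) fuel = false := by
  intro fuel
  induction fuel with
  | zero => intro m _; rw [loopB]
  | succ fuel ih =>
    intro m h
    rw [loopB]
    simp only [← orb_succ]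
    rw [show 2 * m + 1 + 1 = 2 * m + 2 from by omega]
    rw [if_neg (h (m + 1) (by omega)), if_neg (h (2 * m + 1) (by omega)),
      if_neg (h (2 * m + 2) (by omega))]
    by_cases hc : orb num (m + 1) = orb num (2 * m + 2)
    · rw [if_pos hc]
    · rw [if_neg hc]
      have := ih (m + 1) (fun s hs => h s (by omega))
      rw [show 2 * (m + 1) = 2 * m + 2 by omega] at this
      exact this

-- ===== VERDICT (by name: the statement is the Claim_ definition above) =====
theorem collatz_check_spec : Claim_equal_collatz_check := by
  intro num _
  unfold Spec_collatz_check collatz_check collatz_check_alt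
  by_cases h1 : num = 1
  · subst h1
    simp [loopA]
  · rw [if_neg h1]
    by_cases hex : ∃ t, t ≤ 200000 ∧ orb num t = 1
    · have hex' : ∃ t, orb num t = 1 := ⟨hex.choose, hex.choose_spec.2⟩
      set k := Nat.find hex' with hkdef
      have hk : orb num k = 1 := Nat.find_spec hex'
      have hmin : ∀ s, s < k → orb num s ≠ 1 := fun s hs => Nat.find_min hex' hs
      have hkle : k ≤ 200000 := le_trans (Nat.find_le hex.choose_spec.2) hex.choose_spec.1
      have hk0 : 0 < k := by
        rcases Nat.eq_zero_or_pos k with h | h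
        · have := hk; rw [h, orb_zero] at this; exact absurd this h1
        · exact h
      have hA : loopA PySem.Set.empty (orb num 0) 200001 = true := by
        apply loopA_true num k hk hmin 200001 0 _ (by omega) (by omega)
        intro x
        constructor
        · intro h; cases h
        · rintro ⟨s, hs, _⟩; omega
      have hB : loopB (orb num 0) (orb num (2 * 0)) 100000 = true :=
        loopB_true num k hk hmin 100000 0 (by omega) (by omega)
      rw [orb_zero] at hA
      simp only [Nat.mul_zero, orb_zero] at hB
      rw [hA, hB]
    · have hno : ∀ s, s ≤ 200000 → orb num s ≠ 1 := fun s hs h => hex ⟨s, hs, h⟩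
      have hA : loopA PySem.Set.empty (orb num 0) 200001 = false :=
        loopA_false num 200001 0 _ (fun s hs => hno s (by omega))
      have hB : loopB (orb num 0) (orb num (2 * 0)) 100000 = false :=
        loopB_false num 100000 0 (fun s hs => hno s (by omega))
      rw [orb_zero] at hA
      simp only [Nat.mul_zero, orb_zero] at hB
      rw [hA, hB]
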